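-- pv_equiv track=rewrite | github.com/medsidd/whyline-denver | src/whylinedenver/sql_guardrails.py | _split_identifier
-- ===== SOURCE A (Python) =====
-- def _split_identifier(identifier: str) -> tuple[str | None, str | None, str | None]:
--     token = identifier.strip()
--     if not token:
--         return (None, None, None)
--     parts = [segment.strip("`").lower() for segment in token.split(".") if segment]
--     if not parts:
--         return (None, None, None)
--     if len(parts) == 1:
--         return (None, None, parts[0])
--     if len(parts) == 2:
--         return (None, parts[0], parts[1])
--     # Normalize longer identifiers by taking the trailing project.dataset.table
--     return (parts[-3], parts[-2], parts[-1])
-- ===== SOURCE B (Python) =====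
-- def _split_identifier(identifier: str) -> tuple[str | None, str | None, str | None]:
--     project = dataset = table = None
--     for segment in identifier.strip().split("."):
--         if segment:
--             project, dataset, table = dataset, table, segment.strip("`").lower()
--     return (project, dataset, table)
-- ===== Notes on version B (the rewrite author's own statement) =====
-- stated objective: simpler
-- what changed: Replaces the build-a-list-then-branch-on-its-length cascade (with negative indexing) by a single pass over the raw segments maintaining a rolling (project, dataset, table) window of the last three normalized segments; no intermediate parts list and no length case analysis.
import Mathlib
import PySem

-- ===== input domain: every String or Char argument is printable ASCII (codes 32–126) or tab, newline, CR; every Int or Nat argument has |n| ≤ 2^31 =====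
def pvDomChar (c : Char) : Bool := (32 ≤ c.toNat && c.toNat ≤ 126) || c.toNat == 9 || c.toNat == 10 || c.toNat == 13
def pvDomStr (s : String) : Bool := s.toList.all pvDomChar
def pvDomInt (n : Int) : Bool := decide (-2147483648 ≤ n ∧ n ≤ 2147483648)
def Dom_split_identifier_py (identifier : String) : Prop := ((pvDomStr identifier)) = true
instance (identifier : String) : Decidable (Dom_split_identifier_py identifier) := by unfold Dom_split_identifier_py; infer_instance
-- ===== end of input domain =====

-- B replaces A's parts-list + length branch cascade by one pass keeping a rolling window
-- of the last three normalized segments (objective: simpler).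

-- ===== PORT A =====
-- token.split(".") with the literal non-empty separator "." never raises: Str.split? is
-- some here, so .getD [] is exact.
def split_identifier_py (identifier : String) : Option String × Option String × Option String :=
  let token := PySem.Str.strip identifier
  if token = "" then (none, none, none)
  else
    let parts := (((PySem.Str.split? token ".").getD []).filter (fun seg => seg != "")).map
      (fun seg => PySem.Str.lower (PySem.Str.stripChars seg "`"))
    if parts = [] then (none, none, none)
    else if parts.length = 1 then (none, none, some (PySem.List.pyGetD parts 0 ""))
    else if parts.length = 2 then
      (none, some (PySem.List.pyGetD parts 0 ""), some (PySem.List.pyGetD parts 1 ""))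
    else
      (some (PySem.List.pyGetD parts (-3) ""), some (PySem.List.pyGetD parts (-2) ""),
       some (PySem.List.pyGetD parts (-1) ""))

-- ===== PORT B =====
def split_identifier_py_alt (identifier : String) : Option String × Option String × Option String :=
  ((PySem.Str.split? (PySem.Str.strip identifier) ".").getD []).foldl
    (fun st seg =>
      if seg != "" then (st.2.1, st.2.2, some (PySem.Str.lower (PySem.Str.stripChars seg "`")))
      else st)
    (none, none, none)

-- ===== PRECONDITION & SPEC =====
def Spec_split_identifier_py (identifier : String) (out : Option String × Option String × Option String) : Prop := out = split_identifier_py_alt identifier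
instance (identifier : String) (out : Option String × Option String × Option String) : Decidable (Spec_split_identifier_py identifier out) := by unfold Spec_split_identifier_py; infer_instance

-- ===== CLAIM (what is proved, stated in full; the proofs are below) =====
def Claim_equal_split_identifier_py : Prop := ∀ (identifier : String), Dom_split_identifier_py identifier → Spec_split_identifier_py identifier (split_identifier_py identifier)

-- ===== LEMMAS AND PROOFS =====

-- B's step after the empty segments are filtered out and the survivors normalized:
-- it just shifts the rolling window.
def pvShift (st : Option String × Option String × Option String) (v : String) :
    Option String × Option String × Option String := (st.2.1, st.2.2, some v)

-- B's fold over the raw segments equals the window-shift fold over A's `parts` list.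
lemma foldl_step_eq_shift (segs : List String)
    (st : Option String × Option String × Option String) :
    segs.foldl
      (fun st seg =>
        if seg != "" then (st.2.1, st.2.2, some (PySem.Str.lower (PySem.Str.stripChars seg "`")))
        else st) st
    = ((segs.filter (fun seg => seg != "")).map
        (fun seg => PySem.Str.lower (PySem.Str.stripChars seg "`"))).foldl pvShift st := by
  induction segs generalizing st with
  | nil => rfl
  | cons x xs ih =>
    by_cases hx : x = ""
    · subst hx; simpa [pvShift] using ih st
    · have hx' : (x != "") = true := by simp [hx]
      simp only [List.foldl_cons, List.filter_cons, hx', if_pos, List.map_cons]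
      exact ih _

-- The window-shift fold keeps exactly the last three elements.
lemma foldl_shift_concat3 (pre : List String) (u v w : String)
    (st : Option String × Option String × Option String) :
    (pre ++ [u, v, w]).foldl pvShift st = (some u, some v, some w) := by
  induction pre generalizing st with
  | nil => rfl
  | cons x xs ih => exact ih _

-- Any list of length ≥ 3 splits off its last three elements.
lemma exists_concat3 (l : List String) (a b c : String) :
    ∃ pre u v w, a :: b :: c :: l = pre ++ [u, v, w] := by
  induction l generalizing a b c with
  | nil => exact ⟨[], a, b, c, rfl⟩
  | cons r rs ih =>
    obtain ⟨pre, u, v, w, h⟩ := ih b c r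
    exact ⟨a :: pre, u, v, w, by rw [List.cons_append, ← h]⟩

theorem split_identifier_py_spec : Claim_equal_split_identifier_py := by
  intro identifier _
  unfold Spec_split_identifier_py split_identifier_py split_identifier_py_alt
  by_cases h0 : PySem.Str.strip identifier = ""
  · rw [h0]; decide
  · simp only [h0, if_false]
    rw [foldl_step_eq_shift]
    generalize ((((PySem.Str.split? (PySem.Str.strip identifier) ".").getD []).filter
        (fun seg => seg != "")).map
        (fun seg => PySem.Str.lower (PySem.Str.stripChars seg "`"))) = parts
    match parts with
    | [] => rfl
    | [a] => rfl
    | [a, b] => rfl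
    | a :: b :: c :: rest =>
      obtain ⟨pre, u, v, w, hdec⟩ := exists_concat3 rest a b c
      rw [hdec, foldl_shift_concat3]
      have hlen : (pre ++ [u, v, w]).length = pre.length + 3 := by simp
      rw [if_neg (by simp), if_neg (by simp [hlen]), if_neg (by simp [hlen])]
      have e1 : PySem.List.pyGetD (pre ++ [u, v, w]) (-3) "" = u := by
        rw [PySem.List.pyGetD_neg_ofNat _ 3 _ (by omega) (by simp)]
        rw [List.getElem_append_right (by simp [hlen])]
        simp [hlen]
      have e2 : PySem.List.pyGetD (pre ++ [u, v, w]) (-2) "" = v := by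
        rw [PySem.List.pyGetD_neg_ofNat _ 2 _ (by omega) (by simp)]
        rw [List.getElem_append_right (by simp [hlen])]
        simp [hlen]
      have e3 : PySem.List.pyGetD (pre ++ [u, v, w]) (-1) "" = w := by
        rw [PySem.List.pyGetD_neg_ofNat _ 1 _ (by omega) (by simp)]
        rw [List.getElem_append_right (by simp [hlen])]
        simp [hlen]
      rw [e1, e2, e3]
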